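-- pv_equiv track=rewrite | github.com/epilectrik/voynich | phases/SISTER_sister_pair_analysis/ht_grammar_correlation_test.py | build_contingency_table
-- ===== SOURCE A (Python) =====
-- from collections import defaultdict, Counter
--
-- B_GRAMMAR_PREFIXES = ['ch', 'sh', 'qo', 'da', 'ok', 'ot', 'ol', 'al', 'ct']
--
-- HT_PREFIXES = ['yk', 'op', 'yt', 'sa', 'so', 'ka', 'dc', 'pc', 'ta', 'do']
--
-- def get_prefix(token, prefix_list):
--     """Get matching prefix from list, or None."""
--     for p in prefix_list:
--         if token.startswith(p):
--             return p
--     return None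
--
-- def get_grammar_prefix(token):
--     return get_prefix(token, B_GRAMMAR_PREFIXES)
--
-- def get_ht_prefix(token):
--     return get_prefix(token, HT_PREFIXES)
--
-- def build_contingency_table(folio_sequences):
--     """Build contingency table: preceding_grammar_prefix x ht_prefix."""
--     table = defaultdict(Counter)
--
--     for folio, tokens in folio_sequences.items():
--         for i in range(1, len(tokens)):
--             prev_token = tokens[i-1]
--             curr_token = tokens[i]
--
--             grammar_prefix = get_grammar_prefix(prev_token)
--             ht_prefix = get_ht_prefix(curr_token)
--
--             if grammar_prefix and ht_prefix:
--                 table[grammar_prefix][ht_prefix] += 1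
--
--     return table
-- ===== SOURCE B (Python) =====
-- from collections import defaultdict, Counter
--
-- B_GRAMMAR_PREFIXES = ['ch', 'sh', 'qo', 'da', 'ok', 'ot', 'ol', 'al', 'ct']
--
-- HT_PREFIXES = ['yk', 'op', 'yt', 'sa', 'so', 'ka', 'dc', 'pc', 'ta', 'do']
--
-- def get_prefix(token, prefix_list):
--     for p in prefix_list:
--         if token.startswith(p):
--             return p
--     return None
--
-- def classify(pair):
--     """(grammar_prefix, ht_prefix) of an adjacent pair, or None if either is missing."""
--     g = get_prefix(pair[0], B_GRAMMAR_PREFIXES)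
--     h = get_prefix(pair[1], HT_PREFIXES)
--     return (g, h) if g and h else None
--
-- def build_contingency_table(folio_sequences):
--     """Build contingency table: preceding_grammar_prefix x ht_prefix."""
--     # Materialize the classified event list, then aggregate by group-by + counting scans:
--     # no Counter arithmetic, no incremental dict updates.
--     events = [e for tokens in folio_sequences.values()
--                 for e in map(classify, zip(tokens, tokens[1:])) if e is not None]
--     table = defaultdict(Counter)
--     for g in dict.fromkeys(g for g, _ in events):
--         row = [h for eg, h in events if eg == g]
--         table[g] = Counter({h: row.count(h) for h in dict.fromkeys(row)})
--     return table
-- ===== Notes on version B (the rewrite author's own statement) =====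
-- stated objective: alternative
-- what changed: A streams adjacent pairs and increments cells of a nested defaultdict(Counter) in place; B instead materializes the whole classified event list and then computes the table by group-by: deduplicate the grammar keys in first-occurrence order, slice out each key's row, and obtain every cell count with a list.count scan, building each Counter row in one shot with no incremental updates.
import Mathlib
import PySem

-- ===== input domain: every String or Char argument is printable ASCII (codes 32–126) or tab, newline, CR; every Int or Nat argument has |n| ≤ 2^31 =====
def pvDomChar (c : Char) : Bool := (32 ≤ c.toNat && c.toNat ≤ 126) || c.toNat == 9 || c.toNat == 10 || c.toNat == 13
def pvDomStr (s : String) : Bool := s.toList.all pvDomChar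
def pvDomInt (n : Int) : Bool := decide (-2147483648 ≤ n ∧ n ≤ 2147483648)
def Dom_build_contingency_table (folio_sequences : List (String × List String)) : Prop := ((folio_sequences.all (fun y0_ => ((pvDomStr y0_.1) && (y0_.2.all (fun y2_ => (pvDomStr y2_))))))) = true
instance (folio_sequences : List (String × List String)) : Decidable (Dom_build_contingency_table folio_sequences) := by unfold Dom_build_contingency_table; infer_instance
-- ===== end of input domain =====

-- B replaces A's incremental nested defaultdict(Counter) updates by a materialize-then-group-by
-- aggregation: the classified event list is built first, grammar keys are deduped in
-- first-occurrence order, and every cell count is obtained by a list.count scan.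

-- ===== PORT A =====

def pvGrammarPrefixes : List String := ["ch", "sh", "qo", "da", "ok", "ot", "ol", "al", "ct"]

def pvHtPrefixes : List String := ["yk", "op", "yt", "sa", "so", "ka", "dc", "pc", "ta", "do"]

-- get_prefix: first prefix in the list that token starts with, else None
def get_prefix (token : String) : List String → Option String
  | [] => none
  | p :: rest => if PySem.Str.startswith token p then some p else get_prefix token rest

-- port of A: loop over folios, inner loop over range(1, len(tokens)); the index
-- accesses tokens[i-1] / tokens[i] are always in range, so pyGetD's default is never used
def build_contingency_table (folio_sequences : List (String × List String)) :
    List (String × List (String × Int)) :=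
  let table : PySem.Dict String (PySem.Dict String Int) :=
    folio_sequences.foldl (fun table fp =>
      let tokens := fp.2
      (PySem.List.pyRange 1 (tokens.length : Int) 1).foldl (fun table i =>
        let prev_token := PySem.List.pyGetD tokens (i - 1) ""
        let curr_token := PySem.List.pyGetD tokens i ""
        match get_prefix prev_token pvGrammarPrefixes, get_prefix curr_token pvHtPrefixes with
        | some g, some h =>
            let inner := table.getD g PySem.Dict.empty
            table.insert g (inner.insert h (inner.getD h 0 + 1))
        | _, _ => table) table) PySem.Dict.empty
  table.items.map (fun q => (q.1, q.2.items))

-- ===== PORT B =====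

-- classify(pair): (grammar_prefix, ht_prefix) of an adjacent pair, or None
def pvClassify (pc : String × String) : Option (String × String) :=
  match get_prefix pc.1 pvGrammarPrefixes with
  | none => none
  | some g =>
    match get_prefix pc.2 pvHtPrefixes with
    | none => none
    | some h => some (g, h)

-- port of B: materialize the event list (tokens[1:] = tokens.drop 1, exact for this slice),
-- then group-by: dict.fromkeys dedup = PySem.List.dedup, cell counts via list.count
def build_contingency_table_alt (folio_sequences : List (String × List String)) :
    List (String × List (String × Int)) :=
  let events := folio_sequences.flatMap (fun fp => (fp.2.zip (fp.2.drop 1)).filterMap pvClassify)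
  (PySem.List.dedup (events.map Prod.fst)).map (fun g =>
    let row := (events.filter (fun e => e.1 == g)).map Prod.snd
    (g, (PySem.List.dedup row).map (fun h => (h, (row.count h : Int)))))

-- ===== PRECONDITION & SPEC =====
def Spec_build_contingency_table (folio_sequences : List (String × List String)) (out : List (String × List (String × Int))) : Prop := out = build_contingency_table_alt folio_sequences
instance (folio_sequences : List (String × List String)) (out : List (String × List (String × Int))) : Decidable (Spec_build_contingency_table folio_sequences out) := by unfold Spec_build_contingency_table; infer_instance

-- ===== CLAIM (what is proved, stated in full; the proofs are below) =====
def Claim_equal_build_contingency_table : Prop := ∀ (folio_sequences : List (String × List String)), Dom_build_contingency_table folio_sequences → Spec_build_contingency_table folio_sequences (build_contingency_table folio_sequences)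

-- ===== LEMMAS AND PROOFS =====

-- the stream of counted (grammar_prefix, ht_prefix) pairs, in processing order
def pvPairs (folio_sequences : List (String × List String)) : List (String × String) :=
  folio_sequences.flatMap (fun fp => (fp.2.zip (fp.2.drop 1)).filterMap pvClassify)

-- A's per-pair step on the nested table
def pvStepA (t : PySem.Dict String (PySem.Dict String Int)) (p : String × String) :
    PySem.Dict String (PySem.Dict String Int) :=
  t.insert p.1 ((t.getD p.1 PySem.Dict.empty).insert p.2
    ((t.getD p.1 PySem.Dict.empty).getD p.2 0 + 1))

theorem pv_foldl_ext {α σ : Type} (f g : σ → α → σ) (h : ∀ s a, f s a = g s a) :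
    ∀ (l : List α) (s : σ), l.foldl f s = l.foldl g s := by
  intro l
  induction l with
  | nil => intro s; rfl
  | cons x l ih => intro s; rw [List.foldl_cons, List.foldl_cons, h, ih]

theorem pv_zip_map (l : List String) :
    (PySem.List.pyRange 1 (l.length : Int) 1).map
      (fun i => (PySem.List.pyGetD l (i - 1) "", PySem.List.pyGetD l i ""))
    = l.zip (l.drop 1) := by
  rw [PySem.List.pyRange_one, List.map_map]
  apply List.ext_getElem
  · simp only [List.length_map, List.length_range, List.length_zip, List.length_drop]
    omega
  · intro k h1 h2
    simp only [List.getElem_map, List.getElem_range, Function.comp_apply, List.getElem_zip,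
      List.getElem_drop]
    have hk : k < l.length - 1 := by
      simp at h1
      omega
    have e1 : (1 : Int) + (k : Int) - 1 = ((k : Int)) := by ring
    rw [e1]
    rw [PySem.List.pyGetD_eq_getElem l "" (by positivity)
      (by exact_mod_cast (by omega : k < l.length))]
    rw [PySem.List.pyGetD_eq_getElem l "" (by positivity) (by omega)]
    have e2 : ((k : Int)).toNat = k := by omega
    have e3 : ((1 : Int) + (k : Int)).toNat = 1 + k := by omega
    simp only [e2, e3]

theorem pv_tabA_eq (fs : List (String × List String)) :
    fs.foldl (fun table fp =>
      (PySem.List.pyRange 1 (fp.2.length : Int) 1).foldl (fun table i =>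
        let prev_token := PySem.List.pyGetD fp.2 (i - 1) ""
        let curr_token := PySem.List.pyGetD fp.2 i ""
        match get_prefix prev_token pvGrammarPrefixes, get_prefix curr_token pvHtPrefixes with
        | some g, some h =>
            let inner := table.getD g PySem.Dict.empty
            table.insert g (inner.insert h (inner.getD h 0 + 1))
        | _, _ => table) table)
      (PySem.Dict.empty : PySem.Dict String (PySem.Dict String Int))
    = (pvPairs fs).foldl pvStepA PySem.Dict.empty := by
  unfold pvPairs
  rw [List.foldl_flatMap]
  have hfun : ∀ (t : PySem.Dict String (PySem.Dict String Int)) (fp : String × List String),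
      (PySem.List.pyRange 1 (fp.2.length : Int) 1).foldl (fun table i =>
        let prev_token := PySem.List.pyGetD fp.2 (i - 1) ""
        let curr_token := PySem.List.pyGetD fp.2 i ""
        match get_prefix prev_token pvGrammarPrefixes, get_prefix curr_token pvHtPrefixes with
        | some g, some h =>
            let inner := table.getD g PySem.Dict.empty
            table.insert g (inner.insert h (inner.getD h 0 + 1))
        | _, _ => table) t
      = ((fp.2.zip (fp.2.drop 1)).filterMap pvClassify).foldl pvStepA t := by
    intro t fp
    rw [List.foldl_filterMap, ← pv_zip_map fp.2, List.foldl_map]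
    apply pv_foldl_ext
    intro t i
    rcases h1 : get_prefix (PySem.List.pyGetD fp.2 (i - 1) "") pvGrammarPrefixes with _ | a <;>
      rcases h2 : get_prefix (PySem.List.pyGetD fp.2 i "") pvHtPrefixes with _ | b <;>
        simp [pvClassify, pvStepA, h1, h2]
  exact pv_foldl_ext _ _ (fun t fp => hfun t fp) fs PySem.Dict.empty

theorem pv_Aget (P : List (String × String)) (t : PySem.Dict String (PySem.Dict String Int))
    (g : String) :
    (P.foldl pvStepA t).getD g PySem.Dict.empty
    = ((P.filter (fun q => q.1 == g)).map Prod.snd).foldl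
        (fun d h => d.insert h (d.getD h 0 + 1)) (t.getD g PySem.Dict.empty) := by
  induction P generalizing t with
  | nil => rfl
  | cons p P ih =>
    rw [List.foldl_cons, ih, List.filter_cons]
    by_cases h : p.1 = g
    · subst h
      simp [pvStepA]
    · have hb : (p.1 == g) = false := by simp [h]
      have hgp : ¬ (g = p.1) := fun hh => h hh.symm
      simp [pvStepA, PySem.Dict.getD_insert, hb, hgp]

-- A's final table, evaluated at a key g, is exactly Counter(row g)
theorem pv_cell_eq (P : List (String × String)) (g : String) :
    ((P.foldl pvStepA PySem.Dict.empty).getD g PySem.Dict.empty).items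
    = (PySem.List.dedup ((P.filter (fun e => e.1 == g)).map Prod.snd)).map
        (fun h => (h, (((P.filter (fun e => e.1 == g)).map Prod.snd).count h : Int))) := by
  rw [pv_Aget]
  simp only [PySem.Dict.getD_empty]
  rw [PySem.Dict.foldl_insert_getD_add_one_eq_counter, PySem.Dict.items_counter]
  simp [PySem.List.dedup_eq_ofList]

theorem pv_main (fs : List (String × List String)) :
    build_contingency_table fs = build_contingency_table_alt fs := by
  simp only [build_contingency_table, build_contingency_table_alt]
  rw [pv_tabA_eq fs]
  have hP : fs.flatMap (fun fp => (fp.2.zip (fp.2.drop 1)).filterMap pvClassify) = pvPairs fs :=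
    rfl
  rw [hP]
  set P := pvPairs fs with hPdef
  have hnd : ((P.foldl pvStepA PySem.Dict.empty).keys).Nodup := by
    have h := PySem.Dict.nodup_keys_foldl_insert_key P Prod.fst
      (fun (d : PySem.Dict String (PySem.Dict String Int)) p =>
        ((d.getD p.1 PySem.Dict.empty).insert p.2
          ((d.getD p.1 PySem.Dict.empty).getD p.2 0 + 1))) PySem.Dict.empty
      (by rw [PySem.Dict.keys_empty]; exact List.nodup_nil)
    exact h
  have hkeys : (P.foldl pvStepA PySem.Dict.empty).keys
      = PySem.List.dedup (P.map Prod.fst) := by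
    have h := PySem.Dict.keys_foldl_insert_key P Prod.fst
      (fun (d : PySem.Dict String (PySem.Dict String Int)) p =>
        ((d.getD p.1 PySem.Dict.empty).insert p.2
          ((d.getD p.1 PySem.Dict.empty).getD p.2 0 + 1))) PySem.Dict.empty
    rw [PySem.Dict.keys_empty] at h
    rw [PySem.List.dedup_eq_ofList, PySem.Set.ofList_eq_foldl]
    exact h
  rw [PySem.Dict.items_eq_map_keys _ hnd PySem.Dict.empty, hkeys, List.map_map]
  refine List.map_congr_left ?_
  intro g _
  simp only [Function.comp_apply]
  exact congrArg (fun v => (g, v)) (pv_cell_eq P g)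

-- ===== VERDICT (by name: the statement is the Claim_ definition above) =====
theorem build_contingency_table_spec : Claim_equal_build_contingency_table := by
  intro fs _
  unfold Spec_build_contingency_table
  exact pv_main fs
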